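-- pv_equiv track=rewrite | github.com/weltonfelix/cc-ip | Lista 05/E-23.1L5Q5.py | explore_room
-- ===== SOURCE A (Python) =====
-- COIN = "◇"
--
-- SWORD = "espada"
--
-- ZELDA = "Zelda"
--
-- AGAHNIM = "Agahnim"
--
-- def explore_room(room, position, coins, visited_rooms=[], has_sword=False):
--     if position > len(room) - 1:
--         return -1, coins, has_sword
--     if room[position] == COIN:
--         return explore_room(
--             room,
--             position + 1,
--             coins + 1,
--             visited_rooms=visited_rooms,
--             has_sword=has_sword,
--         )
--     elif room[position] == SWORD:
--         return explore_room(
--             room, position + 1, coins, visited_rooms=visited_rooms, has_sword=True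
--         )
--     elif (
--         room[position] == ZELDA
--         or room[position] == AGAHNIM
--         or int(room[position]) in visited_rooms
--     ):
--         return explore_room(
--             room, position + 1, coins, visited_rooms=visited_rooms, has_sword=has_sword
--         )
--     else:
--         return int(room[position]), coins, has_sword
-- ===== SOURCE B (Python) =====
-- COIN = "◇"
--
-- SWORD = "espada"
--
-- ZELDA = "Zelda"
--
-- AGAHNIM = "Agahnim"
--
--
-- def explore_room(room, position, coins, visited_rooms=[], has_sword=False):
--     for i in range(position, len(room)):
--         cell = room[i]
--         if cell == COIN:
--             coins += 1
--         elif cell == SWORD: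
--             has_sword = True
--         elif cell == ZELDA or cell == AGAHNIM or int(cell) in visited_rooms:
--             continue
--         else:
--             return int(cell), coins, has_sword
--     return -1, coins, has_sword
-- ===== Notes on version B (the rewrite author's own statement) =====
-- stated objective: simpler
-- what changed: Replaces A's recursion (with index arithmetic against len(room)) by a single for-loop over range(position, len(room)) with coins/has_sword as mutable locals and an early return at the first unvisited door; same branch order, so it returns, and raises, exactly where A does (including Python's negative indexing).
import Mathlib
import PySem

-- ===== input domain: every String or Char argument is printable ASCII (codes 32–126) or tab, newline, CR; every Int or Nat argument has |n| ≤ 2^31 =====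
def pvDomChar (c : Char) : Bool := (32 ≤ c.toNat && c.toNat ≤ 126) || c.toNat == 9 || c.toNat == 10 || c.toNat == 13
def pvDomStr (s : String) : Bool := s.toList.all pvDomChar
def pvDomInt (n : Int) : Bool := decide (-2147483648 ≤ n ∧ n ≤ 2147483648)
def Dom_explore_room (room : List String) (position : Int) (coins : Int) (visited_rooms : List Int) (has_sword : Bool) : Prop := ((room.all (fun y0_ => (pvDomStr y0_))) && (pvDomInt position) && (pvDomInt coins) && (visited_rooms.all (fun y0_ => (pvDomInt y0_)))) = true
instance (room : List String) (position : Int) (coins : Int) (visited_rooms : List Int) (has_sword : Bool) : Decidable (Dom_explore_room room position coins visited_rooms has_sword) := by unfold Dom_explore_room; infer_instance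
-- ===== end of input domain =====

-- B replaces A's recursion by a single for-loop over range(position, len(room)) with
-- coins/has_sword as mutable accumulators (objective: simpler); return values agree on
-- every input where the Python A returns (Pre_ below excludes exactly A's exceptions,
-- where B raises the same exception).

-- ===== PORT A =====
-- Literal port of A's recursion on the integer index `position`.
-- Where the Python raises (IndexError on position < -len(room), ValueError in int(...)),
-- the PySem primitive yields none and the port returns the placeholder (0, coins,
-- has_sword); exactly those inputs are outside Pre_.
def explore_room (room : List String) (position : Int) (coins : Int) (visited_rooms : List Int) (has_sword : Bool) : Int × Int × Bool :=
  if position > (room.length : Int) - 1 then (-1, coins, has_sword)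
  else
    match PySem.List.pyGet? room position with
    | none => (0, coins, has_sword)     -- IndexError (negative position out of range)
    | some cell =>
      if cell = "◇" then
        explore_room room (position + 1) (coins + 1) visited_rooms has_sword
      else if cell = "espada" then
        explore_room room (position + 1) coins visited_rooms true
      else if cell = "Zelda" ∨ cell = "Agahnim" then
        explore_room room (position + 1) coins visited_rooms has_sword
      else
        match PySem.Int.ofStr? cell with
        | none => (0, coins, has_sword)  -- ValueError from int(room[position])
        | some v =>
          if visited_rooms.contains v then
            explore_room room (position + 1) coins visited_rooms has_sword
          else (v, coins, has_sword)
termination_by ((room.length : Int) - position).toNat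
decreasing_by all_goals omega

-- ===== PORT B =====
-- Port of Source B's `for i in range(position, len(room))` loop: structural recursion over
-- the index list, with the same placeholder values at the same exception points.
def exploreIdx (room : List String) (idxs : List Int) (coins : Int) (visited_rooms : List Int) (has_sword : Bool) : Int × Int × Bool :=
  match idxs with
  | [] => (-1, coins, has_sword)
  | i :: rest =>
    match PySem.List.pyGet? room i with
    | none => (0, coins, has_sword)     -- IndexError; outside Pre_
    | some cell =>
      if cell = "◇" then exploreIdx room rest (coins + 1) visited_rooms has_sword
      else if cell = "espada" then exploreIdx room rest coins visited_rooms true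
      else if cell = "Zelda" ∨ cell = "Agahnim" then exploreIdx room rest coins visited_rooms has_sword
      else
        match PySem.Int.ofStr? cell with
        | none => (0, coins, has_sword)  -- ValueError from int(cell); outside Pre_
        | some v =>
          if visited_rooms.contains v then exploreIdx room rest coins visited_rooms has_sword
          else (v, coins, has_sword)

def explore_room_alt (room : List String) (position : Int) (coins : Int) (visited_rooms : List Int) (has_sword : Bool) : Int × Int × Bool :=
  exploreIdx room (PySem.List.pyRange position (room.length : Int) 1) coins visited_rooms has_sword

-- ===== PRECONDITION & SPEC =====
-- The cells A scans, in scan order: from a nonnegative position the tail room[position:];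
-- from a negative in-range position Python's negative indexing visits the last
-- |position| cells and then (once the index reaches 0) the whole list again.
def pvScanCells (room : List String) (position : Int) : List String :=
  if 0 ≤ position then room.drop position.toNat
  else room.drop (position + room.length).toNat ++ room

-- A cell the scan steps over without returning: one of the four tokens, or an int
-- literal whose value is a visited room.
def pvSkipCell (visited_rooms : List Int) (cell : String) : Bool :=
  cell == "◇" || cell == "espada" || cell == "Zelda" || cell == "Agahnim" ||
    (match PySem.Int.ofStr? cell with
     | some v => visited_rooms.contains v
     | none => false)

-- Pre_ holds exactly where the Python A returns normally: the start index must not be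
-- below -len(room) (else IndexError), and the first scanned cell that is neither a
-- token nor a visited door must parse as an int (else ValueError there).  It excludes
-- no input on which A returns.
def Pre_explore_room (room : List String) (position : Int) (coins : Int) (visited_rooms : List Int) (has_sword : Bool) : Prop :=
  (position > (room.length : Int) - 1 ∨ -(room.length : Int) ≤ position) ∧
  (((if position > (room.length : Int) - 1 then []
      else pvScanCells room position).dropWhile (pvSkipCell visited_rooms)).head?.all
     (fun c => (PySem.Int.ofStr? c).isSome)) = true
instance (room : List String) (position : Int) (coins : Int) (visited_rooms : List Int) (has_sword : Bool) : Decidable (Pre_explore_room room position coins visited_rooms has_sword) := by unfold Pre_explore_room; infer_instance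

def pvWitness_explore_room : List String × Int × Int × List Int × Bool :=
  (["espada", "Zelda", "7", "3"], 0, 0, [7], false)

def Spec_explore_room (room : List String) (position : Int) (coins : Int) (visited_rooms : List Int) (has_sword : Bool) (out : Int × Int × Bool) : Prop := out = explore_room_alt room position coins visited_rooms has_sword
instance (room : List String) (position : Int) (coins : Int) (visited_rooms : List Int) (has_sword : Bool) (out : Int × Int × Bool) : Decidable (Spec_explore_room room position coins visited_rooms has_sword out) := by unfold Spec_explore_room; infer_instance

-- ===== CLAIM (what is proved, stated in full; the proofs are below) =====
def Claim_equal_explore_room : Prop := ∀ (room : List String) (position : Int) (coins : Int) (visited_rooms : List Int) (has_sword : Bool), Dom_explore_room room position coins visited_rooms has_sword → Pre_explore_room room position coins visited_rooms has_sword → Spec_explore_room room position coins visited_rooms has_sword (explore_room room position coins visited_rooms has_sword)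

-- ===== LEMMAS AND PROOFS =====

-- A's recursion on the index equals B's scan of the index list range(position, len):
-- both step through the same indices with the same state and the same placeholders.
theorem explore_room_eq_exploreIdx (room : List String) (position : Int) (coins : Int)
    (visited_rooms : List Int) (has_sword : Bool) :
    explore_room room position coins visited_rooms has_sword
      = exploreIdx room (PySem.List.pyRange position (room.length : Int) 1) coins visited_rooms has_sword := by
  rw [explore_room]
  by_cases hend : position > (room.length : Int) - 1
  · rw [if_pos hend, PySem.List.pyRange_one_eq_nil (by omega), exploreIdx]
  · rw [if_neg hend, PySem.List.pyRange_one_cons (by omega), exploreIdx]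
    have ih1 := explore_room_eq_exploreIdx room (position + 1) (coins + 1) visited_rooms has_sword
    have ih2 := explore_room_eq_exploreIdx room (position + 1) coins visited_rooms true
    have ih3 := explore_room_eq_exploreIdx room (position + 1) coins visited_rooms has_sword
    cases PySem.List.pyGet? room position with
    | none => rfl
    | some cell =>
      simp only []
      split_ifs <;> simp_all
termination_by ((room.length : Int) - position).toNat
decreasing_by all_goals omega

-- ===== VERDICT (by name: the statement is the Claim_ definition above) =====
theorem explore_room_spec : Claim_equal_explore_room := by
  intro room position coins visited_rooms has_sword _ _
  unfold Spec_explore_room explore_room_alt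
  exact explore_room_eq_exploreIdx room position coins visited_rooms has_sword
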